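-- pv_equiv track=rewrite | github.com/Kerorogunso/DailyProgrammer | 204regularbinary.py | hyperbinary
-- ===== SOURCE A (Python) =====
-- from itertools import permutations, combinations, product
--
-- def hyperbinary(number):
--     valid_representations = []
--     bin_number = bin(number)
--     max_chars = len(bin_number) - 2
--
--     all_rep = [list(map(int, list(x))) for x in product('012', repeat = max_chars)]
--     for representation in all_rep:
--         evaluate = sum([2**(max_chars - i - 1) * x for i, x in enumerate(representation)])
--         if evaluate == number:
--             valid_representations.append(int(''.join([str(x) for x in representation])))
--
--     return valid_representations
-- ===== SOURCE B (Python) =====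
-- def hyperbinary(number):
--     # DFS over digit positions (digits tried in order 0,1,2) with exact bound
--     # pruning: only branches that can still reach the target are explored.
--     if number < 0:
--         return []
--     res = []
--
--     def dfs(weight, rem, acc):
--         if weight == 0:
--             res.append(acc)
--             return
--         for d in (0, 1, 2):
--             nr = rem - d * weight
--             if 0 <= nr <= 2 * (weight - 1):
--                 dfs(weight // 2, nr, acc * 10 + d)
--
--     dfs(1 << (max(number.bit_length(), 1) - 1), number, 0)
--     return res
-- ===== Notes on version B (the rewrite author's own statement) =====
-- stated objective: faster
-- what changed: A exhaustively enumerates every possible digit string of the target's bit length and evaluates each one; B does a depth-first search over the digit positions, trying smaller digits first, pruning every branch whose remaining positions cannot reach the target.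
import Mathlib
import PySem

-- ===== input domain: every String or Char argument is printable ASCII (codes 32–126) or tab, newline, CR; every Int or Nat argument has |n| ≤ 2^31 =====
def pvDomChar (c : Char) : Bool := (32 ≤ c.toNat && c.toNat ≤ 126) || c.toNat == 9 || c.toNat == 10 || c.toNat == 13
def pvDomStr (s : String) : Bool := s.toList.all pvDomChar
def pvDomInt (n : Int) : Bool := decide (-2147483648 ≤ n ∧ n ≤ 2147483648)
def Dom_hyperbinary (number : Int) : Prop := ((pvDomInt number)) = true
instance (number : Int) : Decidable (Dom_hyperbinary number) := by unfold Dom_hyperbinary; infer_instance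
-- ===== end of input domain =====

-- B replaces A's exhaustive enumeration of all 3^max_chars digit strings by a DFS over the
-- digit positions (smaller digits tried first) with exact bound pruning; return value only,
-- no side effects in either version.

-- ===== PORT A =====

-- product('012', repeat = k) with each string turned into its list of int digits
-- (list(map(int, list(x)))): the pool '012' becomes the digit pool [0,1,2];
-- leftmost position varies slowest, exactly itertools.product's order.
def pvProd3 : Nat → List (List Int)
  | 0 => [[]]
  | k + 1 => ([0, 1, 2] : List Int).flatMap (fun x => (pvProd3 k).map (fun r => x :: r))

-- sum([2**(max_chars - i - 1) * x for i, x in enumerate(representation)]);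
-- every representation has length max_chars, so i < max_chars and the
-- Nat subtraction max_chars - i - 1 agrees with Python's int arithmetic.
def pvEvalA (maxc : Nat) (rep : List Int) : Int :=
  ((PySem.List.enumerate rep).map (fun p => (2 : Int) ^ (maxc - p.1.toNat - 1) * p.2)).sum

-- int(''.join([str(x) for x in representation])): each x is a digit 0/1/2, so joining the
-- decimal digit strings and parsing back is exactly the left fold acc*10 + x.
def pvToIntA (rep : List Int) : Int := rep.foldl (fun a d => a * 10 + d) 0

def hyperbinary (number : Int) : List Int :=
  -- max_chars = len(bin(number)) - 2; bin always yields at least '0b0', so max_chars ≥ 1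
  -- and .toNat is exact
  let maxChars : Nat := (PySem.Str.len (PySem.Int.pyBin number) - 2).toNat
  let allRep : List (List Int) := pvProd3 maxChars
  allRep.foldl
    (fun acc rep => if pvEvalA maxChars rep = number then acc ++ [pvToIntA rep] else acc) []

-- ===== PORT B =====

-- dfs(weight, rem, acc) from Source B; the for-loop over (0, 1, 2) is unrolled into its three
-- iterations, each contributing the sublist its recursive call appends to res.
def pvDfs (w : Nat) (rem : Int) (acc : Int) : List Int :=
  if h : w = 0 then [acc]
  else
    (if 0 ≤ rem - 0 * (w : Int) ∧ rem - 0 * (w : Int) ≤ 2 * ((w : Int) - 1) then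
        pvDfs (w / 2) (rem - 0 * (w : Int)) (acc * 10 + 0) else []) ++
    (if 0 ≤ rem - 1 * (w : Int) ∧ rem - 1 * (w : Int) ≤ 2 * ((w : Int) - 1) then
        pvDfs (w / 2) (rem - 1 * (w : Int)) (acc * 10 + 1) else []) ++
    (if 0 ≤ rem - 2 * (w : Int) ∧ rem - 2 * (w : Int) ≤ 2 * ((w : Int) - 1) then
        pvDfs (w / 2) (rem - 2 * (w : Int)) (acc * 10 + 2) else [])
termination_by w
decreasing_by all_goals exact Nat.div_lt_self (Nat.pos_of_ne_zero h) (by norm_num)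

def hyperbinary_alt (number : Int) : List Int :=
  if number < 0 then []
  else pvDfs (1 <<< (max (PySem.Int.bitLength number) 1 - 1)) number 0

-- ===== PRECONDITION & SPEC =====
def Spec_hyperbinary (number : Int) (out : List Int) : Prop := out = hyperbinary_alt number
instance (number : Int) (out : List Int) : Decidable (Spec_hyperbinary number out) := by unfold Spec_hyperbinary; infer_instance

-- ===== CLAIM (what is proved, stated in full; the proofs are below) =====
def Claim_equal_hyperbinary : Prop := ∀ (number : Int), Dom_hyperbinary number → Spec_hyperbinary number (hyperbinary number)

-- ===== LEMMAS AND PROOFS =====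

-- structural evaluator: the value of a digit string read with place values 2^position
def pvEvalR : List Int → Int
  | [] => 0
  | d :: r => d * 2 ^ r.length + pvEvalR r

theorem pvProd3_mem {k : Nat} {rep : List Int} (h : rep ∈ pvProd3 k) :
    rep.length = k ∧ ∀ d ∈ rep, d = 0 ∨ d = 1 ∨ d = 2 := by
  induction k generalizing rep with
  | zero => simp [pvProd3] at h; simp [h]
  | succ k ih =>
    simp only [pvProd3, List.mem_flatMap, List.mem_map] at h
    obtain ⟨x, hx, r, hr, rfl⟩ := h
    obtain ⟨hlen, hdig⟩ := ih hr
    refine ⟨by simp [hlen], ?_⟩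
    intro d hd
    rcases List.mem_cons.mp hd with rfl | hd
    · simpa using hx
    · exact hdig d hd

theorem pvEvalR_bounds {rep : List Int} (h : ∀ d ∈ rep, d = 0 ∨ d = 1 ∨ d = 2) :
    0 ≤ pvEvalR rep ∧ pvEvalR rep ≤ 2 * ((2 : Int) ^ rep.length - 1) := by
  induction rep with
  | nil => simp [pvEvalR]
  | cons d r ih =>
    have hd : d = 0 ∨ d = 1 ∨ d = 2 := h d (List.mem_cons_self ..)
    have hr := ih (fun x hx => h x (List.mem_cons_of_mem _ hx))
    have hp : (0 : Int) < 2 ^ r.length := pow_pos (by norm_num) _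
    have hd0 : (0 : Int) ≤ d := by rcases hd with rfl | rfl | rfl <;> norm_num
    have hd2 : d ≤ 2 := by rcases hd with rfl | rfl | rfl <;> norm_num
    constructor
    · simp only [pvEvalR]
      have : 0 ≤ d * 2 ^ r.length := mul_nonneg hd0 (le_of_lt hp)
      omega
    · simp only [pvEvalR, List.length_cons]
      have h1 : d * 2 ^ r.length ≤ 2 * 2 ^ r.length :=
        mul_le_mul_of_nonneg_right hd2 (le_of_lt hp)
      have h2 : (2 : Int) ^ (r.length + 1) = 2 * 2 ^ r.length := by ring
      omega

-- the enumerate-based evaluator of A agrees with the structural one on digit strings of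
-- full length maxc
theorem pvEvalA_aux (rep : List Int) : ∀ (s k : Nat), s + rep.length ≤ k →
    ((PySem.List.enumerate rep (s : Int)).map
        (fun p => (2 : Int) ^ (k - p.1.toNat - 1) * p.2)).sum
      = pvEvalR rep * 2 ^ (k - s - rep.length) := by
  induction rep with
  | nil => intro s k _; simp [PySem.List.enumerate_nil, pvEvalR]
  | cons d r ih =>
    intro s k hk
    rw [PySem.List.enumerate_cons]
    have hs1 : (s : Int) + 1 = ((s + 1 : Nat) : Int) := by push_cast; ring
    have hlk : s + 1 + r.length ≤ k := by simp at hk; omega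
    have hr := ih (s + 1) k hlk
    simp only [List.map_cons, List.sum_cons, hs1, hr, pvEvalR, List.length_cons,
      Int.toNat_natCast]
    have e1 : k - s - (r.length + 1) = k - (s + 1) - r.length := by omega
    have e2 : k - s - 1 = (k - (s + 1) - r.length) + r.length := by simp at hk; omega
    rw [e1, e2, pow_add]
    ring

theorem pvEvalA_eq {k : Nat} {rep : List Int} (h : rep.length = k) :
    pvEvalA k rep = pvEvalR rep := by
  have h2 := pvEvalA_aux rep 0 k (by omega)
  norm_num at h2
  unfold pvEvalA
  rw [h2, h]
  simp

-- DFS with exact pruning = filter of the exhaustive enumeration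
theorem pvDfs_eq (k : Nat) : ∀ (rem acc : Int),
    pvDfs (2 ^ k) rem acc
      = ((pvProd3 (k + 1)).filter (fun rep => decide (pvEvalR rep = rem))).map
          (fun rep => rep.foldl (fun a d => a * 10 + d) acc) := by
  induction k with
  | zero =>
    intro rem acc
    have hz : ∀ rem acc : Int, pvDfs 0 rem acc = [acc] := by
      intro rem acc; rw [pvDfs]; simp
    rw [pvDfs]
    rw [dif_neg (by norm_num : ¬ (2 : Nat) ^ 0 = 0)]
    norm_num [hz, pvProd3, pvEvalR, List.filter_cons]
    split_ifs <;> simp_all <;> omega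
  | succ k ih =>
    intro rem acc
    rw [pvDfs]
    have hw : (2 : Nat) ^ (k + 1) ≠ 0 := by positivity
    rw [dif_neg hw]
    have hdiv : 2 ^ (k + 1) / 2 = 2 ^ k := by
      rw [pow_succ, Nat.mul_div_cancel _ (by norm_num)]
    have hcast : ((2 ^ (k + 1) : Nat) : Int) = 2 ^ (k + 1) := by push_cast; ring
    -- the three branches
    have branch : ∀ d : Int, d = 0 ∨ d = 1 ∨ d = 2 →
        (if 0 ≤ rem - d * ((2 ^ (k + 1) : Nat) : Int) ∧
            rem - d * ((2 ^ (k + 1) : Nat) : Int) ≤ 2 * (((2 ^ (k + 1) : Nat) : Int) - 1) then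
          pvDfs (2 ^ (k + 1) / 2) (rem - d * ((2 ^ (k + 1) : Nat) : Int)) (acc * 10 + d) else [])
        = (((pvProd3 (k + 1)).map (fun r => d :: r)).filter
              (fun rep => decide (pvEvalR rep = rem))).map
            (fun rep => rep.foldl (fun a d => a * 10 + d) acc) := by
      intro d hd
      rw [hdiv, hcast]
      have hfc : ((pvProd3 (k + 1)).map (fun r => d :: r)).filter
            (fun rep => decide (pvEvalR rep = rem))
          = ((pvProd3 (k + 1)).filter
              (fun r => decide (pvEvalR r = rem - d * 2 ^ (k + 1)))).map (fun r => d :: r) := by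
        rw [List.filter_map]
        congr 1
        apply List.filter_congr
        intro r hr
        have hlen := (pvProd3_mem hr).1
        simp only [Function.comp_apply, pvEvalR, hlen, decide_eq_decide]
        constructor <;> intro h <;> linarith
      by_cases hc : 0 ≤ rem - d * ((2 : Int) ^ (k + 1)) ∧
          rem - d * ((2 : Int) ^ (k + 1)) ≤ 2 * (((2 : Int) ^ (k + 1)) - 1)
      · rw [if_pos hc, ih, hfc, List.map_map]
        simp [Function.comp]
      · rw [if_neg hc, hfc]
        have : (pvProd3 (k + 1)).filter
            (fun r => decide (pvEvalR r = rem - d * 2 ^ (k + 1))) = [] := by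
          rw [List.filter_eq_nil_iff]
          intro r hr
          have hlen := (pvProd3_mem hr).1
          have hb := pvEvalR_bounds (pvProd3_mem hr).2
          rw [hlen] at hb
          simp only [decide_eq_true_eq]
          intro he
          rw [he] at hb
          exact hc ⟨hb.1, hb.2⟩
        rw [this]
        simp
    have h0 := branch 0 (Or.inl rfl)
    have h1 := branch 1 (Or.inr (Or.inl rfl))
    have h2 := branch 2 (Or.inr (Or.inr rfl))
    rw [h0, h1, h2]
    have hsplit : pvProd3 (k + 1 + 1)
        = (pvProd3 (k + 1)).map (fun r => (0 : Int) :: r)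
          ++ (pvProd3 (k + 1)).map (fun r => (1 : Int) :: r)
          ++ (pvProd3 (k + 1)).map (fun r => (2 : Int) :: r) := by
      conv_lhs => rw [pvProd3]
      simp [List.flatMap_cons]
    rw [hsplit]
    simp [List.filter_append, List.map_append]

-- length of bin(n) minus 2, as a Nat
theorem pvBitLength_pos {n : Int} (h : n ≠ 0) : 1 ≤ PySem.Int.bitLength n := by
  by_contra hb
  have h0 : PySem.Int.bitLength n = 0 := by omega
  have := PySem.Int.lt_two_pow_bitLength n
  rw [h0] at this
  simp at this
  exact h (by omega)

theorem pvToDigits_len {m : Nat} (h : m ≠ 0) :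
    (Nat.toDigits 2 m).length = PySem.Int.bitLength (m : Int) := by
  have hbl : 1 ≤ PySem.Int.bitLength (m : Int) := pvBitLength_pos (by exact_mod_cast h)
  have hub : m < 2 ^ PySem.Int.bitLength (m : Int) := by
    have := PySem.Int.lt_two_pow_bitLength (m : Int)
    simpa using this
  have hlb : 2 ^ (PySem.Int.bitLength (m : Int) - 1) ≤ m := by
    have := PySem.Int.two_pow_bitLength_le (m : Int) (by exact_mod_cast h)
    simpa using this
  have hle : (Nat.toDigits 2 m).length ≤ PySem.Int.bitLength (m : Int) :=
    (Nat.length_toDigits_le_iff (by norm_num) (by omega)).mpr hub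
  have hgt : ¬ (Nat.toDigits 2 m).length ≤ PySem.Int.bitLength (m : Int) - 1 := by
    by_cases hone : PySem.Int.bitLength (m : Int) - 1 = 0
    · have := @Nat.length_toDigits_pos 2 m
      omega
    · intro hcon
      have := (Nat.length_toDigits_le_iff (b := 2) (n := m) (by norm_num) (by omega)).mp hcon
      omega
  omega

theorem pvMaxChars_eq (n : Int) :
    (PySem.Str.len (PySem.Int.pyBin n) - 2).toNat
      = if n < 0 then PySem.Int.bitLength n + 1 else max (PySem.Int.bitLength n) 1 := by
  have hlen : PySem.Str.len (PySem.Int.pyBin n)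
      = ((PySem.Int.toBinChars0b n).length : Int) := by
    unfold PySem.Str.len
    rw [PySem.Int.toList_pyBin]
  rw [hlen]
  unfold PySem.Int.toBinChars0b
  by_cases hneg : n < 0
  · rw [if_pos hneg, if_pos hneg]
    have hna : n.natAbs ≠ 0 := by omega
    have := pvToDigits_len hna
    have hbl : PySem.Int.bitLength (n.natAbs : Int) = PySem.Int.bitLength n := by
      rcases Int.natAbs_eq n with he | he
      · rw [← he]
      · rw [show ((n.natAbs : Int)) = -n by omega]
        exact PySem.Int.bitLength_neg n
    simp only [List.length_cons]
    omega
  · rw [if_neg hneg, if_neg hneg]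
    by_cases h0 : n = 0
    · subst h0
      norm_num [PySem.Int.bitLength_zero]
    · have hna : n.toNat ≠ 0 := by omega
      have hlen2 : (Nat.toDigits 2 n.toNat).length = PySem.Int.bitLength n := by
        rw [pvToDigits_len hna, show ((n.toNat : Int)) = n by omega]
      have hbl : 1 ≤ PySem.Int.bitLength n := pvBitLength_pos h0
      simp only [List.length_cons]
      omega

-- the filter is empty for negative targets
theorem pvFilter_neg {n : Int} (hn : n < 0) (k : Nat) :
    (pvProd3 k).filter (fun rep => decide (pvEvalR rep = n)) = [] := by
  rw [List.filter_eq_nil_iff]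
  intro r hr
  have hb := (pvEvalR_bounds (pvProd3_mem hr).2).1
  simp only [decide_eq_true_eq]
  intro he
  omega

-- A's loop, made explicit: filter + map over the enumeration, with A's evaluator replaced
-- by the structural one
theorem pvHyperbinary_eq (n : Int) (k : Nat)
    (hk : (PySem.Str.len (PySem.Int.pyBin n) - 2).toNat = k) :
    hyperbinary n
      = ((pvProd3 k).filter (fun rep => decide (pvEvalR rep = n))).map pvToIntA := by
  unfold hyperbinary
  rw [hk]
  rw [PySem.List.foldl_append_ite (fun rep => pvEvalA k rep = n) pvToIntA]
  rw [List.nil_append]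
  congr 1
  apply List.filter_congr
  intro r hr
  rw [pvEvalA_eq (pvProd3_mem hr).1]

-- ===== VERDICT (by name: the statement is the Claim_ definition above) =====
theorem hyperbinary_spec : Claim_equal_hyperbinary := by
  intro n _
  unfold Spec_hyperbinary hyperbinary_alt
  by_cases hneg : n < 0
  · rw [if_pos hneg]
    rw [pvHyperbinary_eq n _ rfl, pvFilter_neg hneg]
    simp
  · rw [if_neg hneg]
    set K : Nat := max (PySem.Int.bitLength n) 1 with hK
    have hK1 : 1 ≤ K := le_max_right _ _
    have hmc : (PySem.Str.len (PySem.Int.pyBin n) - 2).toNat = K := by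
      rw [pvMaxChars_eq n, if_neg hneg]
    have hshift : 1 <<< (K - 1) = 2 ^ (K - 1) := by
      rw [Nat.shiftLeft_eq]; omega
    rw [hshift, pvDfs_eq (K - 1) n 0, show K - 1 + 1 = K by omega]
    rw [pvHyperbinary_eq n K hmc]
    rfl
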